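-- pv_equiv track=rewrite | github.com/yh97yhyh/ProblemSolving | programmers/test1/01.py | solution
-- ===== SOURCE A (Python) =====
-- def solution(table):
--     l = len(table[0])
--     answer = []
--     for t1 in table:
--         temp = [0 for i in range(l)]
--         cnt = 0
--         for i in range(l):
--             if t1[i] == "O":
--                 temp[i] = 1
--         for t2 in table:
--             if t1 == t2:
--                 continue
--             cnt += 1
--             for j in range(l):
--                 if t2[j] == "O":
--                     temp[j] = 1
--             if temp == [1 for i in range(l)]:
--                 answer.append(cnt)
--
--     return answer
-- ===== SOURCE B (Python) =====
-- def solution(table):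
--     n = len(table)
--     l = len(table[0])
--     full = (1 << l) - 1
--     masks = []
--     for row in table:
--         m = 0
--         for i in range(l):
--             if row[i] == "O":
--                 m |= 1 << i
--         masks.append(m)
--     prefix = [0]
--     acc = 0
--     for m in masks:
--         acc |= m
--         prefix.append(acc)
--     answer = []
--     for t1, m in zip(table, masks):
--         if (m | prefix[n]) != full:
--             continue
--         j0 = 0
--         while (m | prefix[j0]) != full:
--             j0 += 1
--         eq_before = sum(1 for r in table[:j0] if r == t1)
--         total_eq = sum(1 for r in table if r == t1)
--         c0 = j0 - eq_before
--         if c0 < 1: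
--             c0 = 1
--         answer.extend(range(c0, n - total_eq + 1))
--     return answer
-- ===== Notes on version B (the rewrite author's own statement) =====
-- stated objective: faster
-- what changed: A re-ORs a per-row 0/1 column list over all other rows for every row (O(n^2*l) character work); B builds integer bitmasks and one shared prefix-OR table once, finds the first covering prefix by a linear scan with O(1) mask comparisons, and emits the answer counters as a closed-form range.
import Mathlib
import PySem

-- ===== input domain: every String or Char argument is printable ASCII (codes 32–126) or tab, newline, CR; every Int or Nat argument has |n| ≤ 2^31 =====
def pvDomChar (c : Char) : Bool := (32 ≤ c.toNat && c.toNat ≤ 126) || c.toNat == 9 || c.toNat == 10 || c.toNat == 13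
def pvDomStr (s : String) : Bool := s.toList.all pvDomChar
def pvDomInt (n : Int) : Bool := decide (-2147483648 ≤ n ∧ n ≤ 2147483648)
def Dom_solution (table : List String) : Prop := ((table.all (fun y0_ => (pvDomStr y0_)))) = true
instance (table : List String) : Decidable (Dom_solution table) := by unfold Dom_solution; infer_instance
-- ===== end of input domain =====

-- B replaces A's per-row quadratic re-OR of 0/1 column lists by integer bitmasks, one shared
-- prefix-OR table and a closed-form range of counters per row (objective: faster).

-- ===== PORT A =====
-- literal transliteration of A; t1[i] is read via getD ' ', exact under Pre_ (index < row length)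
def solution (table : List String) : List Int :=
  let l := (table.headD "").toList.length
  table.foldl (fun answer t1 =>
    let temp0 := (List.range l).foldl
      (fun temp i => if t1.toList.getD i ' ' = 'O' then temp.set i 1 else temp)
      (List.replicate l (0 : Int))
    (table.foldl (fun (st : List Int × Int × List Int) t2 =>
        if t1 == t2 then st
        else
          let cnt := st.2.1 + 1
          let temp := (List.range l).foldl
            (fun temp j => if t2.toList.getD j ' ' = 'O' then temp.set j 1 else temp) st.1
          let ans := if temp == List.replicate l (1 : Int) then st.2.2 ++ [cnt] else st.2.2
          (temp, cnt, ans))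
      (temp0, 0, answer)).2.2) []

-- ===== PORT B =====
-- Source B's inner mask loop: m = 0; for i in range(l): if row[i] == "O": m |= 1 << i
def maskRow (l : Nat) (row : List Char) : Nat :=
  (List.range l).foldl (fun m i => if row.getD i ' ' = 'O' then m ||| (1 <<< i) else m) 0

def solution_alt (table : List String) : List Int :=
  let n := table.length
  let l := (table.headD "").toList.length
  let full := (1 <<< l) - 1
  let masks := table.map (fun row => maskRow l row.toList)
  let pr := (masks.foldl (fun (st : List Nat × Nat) m =>
      let acc := st.2 ||| m
      (st.1 ++ [acc], acc)) ([0], 0)).1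
  (table.zip masks).foldl (fun answer tm =>
    if (tm.2 ||| pr.getD n 0) != full then answer
    else
      -- Source B's `while (m | prefix[j0]) != full: j0 += 1` is this linear first-index scan
      let j0 := pr.findIdx (fun p => (tm.2 ||| p) == full)
      let eqb := (table.take j0).countP (fun r => r == tm.1)
      let teq := table.countP (fun r => r == tm.1)
      let c0 := j0 - eqb
      let c0 := if c0 < 1 then 1 else c0
      answer ++ PySem.List.pyRange (c0 : Int) ((n : Int) - (teq : Int) + 1) 1) []

-- ===== PRECONDITION & SPEC =====
-- Pre_ excludes exactly the inputs where the Python A raises: the empty table (table[0] is an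
-- IndexError) and tables whose later rows are shorter than row 0 (t[i] IndexError).
def Pre_solution (table : List String) : Prop :=
  table ≠ [] ∧ ∀ s ∈ table, (table.headD "").toList.length ≤ s.toList.length
instance (table : List String) : Decidable (Pre_solution table) := by unfold Pre_solution; infer_instance
def pvWitness_solution : List String := (["OX", "XO", "OX"])
def Spec_solution (table : List String) (out : List Int) : Prop := out = solution_alt table
instance (table : List String) (out : List Int) : Decidable (Spec_solution table out) := by unfold Spec_solution; infer_instance

-- ===== CLAIM (what is proved, stated in full; the proofs are below) =====
def Claim_equal_solution : Prop := ∀ (table : List String), Dom_solution table → Pre_solution table → Spec_solution table (solution table)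

-- ===== LEMMAS AND PROOFS =====

-- covb l m: mask m has all l column bits set ("temp == [1]*l" / "m | p == full")
def covb (l m : Nat) : Bool := (List.range l).all fun i => m.testBit i

-- OR of the masks of the first j rows
def preO (l : Nat) (rs : List String) (j : Nat) : Nat :=
  (rs.take j).foldl (fun a r => a ||| maskRow l r.toList) 0

def orAll (l : Nat) (rs : List String) : Nat := preO l rs rs.length

-- first j at which m together with the first j rows covers everything
def jfst (l m : Nat) : List String → Nat
  | [] => 0
  | r :: rs => if covb l m then 0 else jfst l (m ||| maskRow l r.toList) rs + 1

def eqcnt (t1 : String) (rs : List String) (j : Nat) : Nat :=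
  (rs.take j).countP (fun r => r == t1)

def necnt (t1 : String) (rs : List String) : Nat := rs.countP (fun r => !(t1 == r))

def cstart (l : Nat) (t1 : String) (m : Nat) (rs : List String) : Nat :=
  max 1 (jfst l m rs - eqcnt t1 rs (jfst l m rs))

-- the per-t1 list A's inner loop appends, as a recursion over the remaining rows
def Sspec (l : Nat) (t1 : String) : List String → Nat → Int → List Int
  | [], _, _ => []
  | r :: rs, m, cnt =>
    if t1 == r then Sspec l t1 rs m cnt
    else (if covb l (m ||| maskRow l r.toList) then [cnt + 1] else [])
         ++ Sspec l t1 rs (m ||| maskRow l r.toList) (cnt + 1)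

theorem orAll_def (l : Nat) (rs : List String) : orAll l rs = preO l rs rs.length := rfl

theorem foldl_or_shift {α : Type} (g : α → Nat) (xs : List α) (a : Nat) :
    xs.foldl (fun acc x => acc ||| g x) a = a ||| xs.foldl (fun acc x => acc ||| g x) 0 := by
  induction xs generalizing a with
  | nil => simp
  | cons x xs ih =>
    simp only [List.foldl_cons]
    rw [ih (a ||| g x), ih (0 ||| g x), Nat.zero_or, Nat.or_assoc]

theorem preO_zero (l : Nat) (rs : List String) : preO l rs 0 = 0 := by simp [preO]

theorem preO_cons (l : Nat) (r : String) (rs : List String) (j : Nat) :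
    preO l (r :: rs) (j + 1) = maskRow l r.toList ||| preO l rs j := by
  simp only [preO, List.take_succ_cons, List.foldl_cons, Nat.zero_or]
  exact foldl_or_shift _ _ _

theorem orAll_cons (l : Nat) (r : String) (rs : List String) :
    orAll l (r :: rs) = maskRow l r.toList ||| orAll l rs := by
  simp only [orAll, List.length_cons]
  rw [preO_cons]

theorem covb_iff (l m : Nat) : covb l m = true ↔ ∀ i < l, m.testBit i = true := by
  simp [covb, List.all_eq_true, List.mem_range]

theorem covb_mono (l m x : Nat) (h : covb l m = true) : covb l (m ||| x) = true := by
  rw [covb_iff] at *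
  intro i hi
  simp [Nat.testBit_or, h i hi]

theorem jfst_of_cov (l m : Nat) (rs : List String) (h : covb l m = true) : jfst l m rs = 0 := by
  cases rs <;> simp [jfst, h]

theorem jfst_le (l m : Nat) (rs : List String) : jfst l m rs ≤ rs.length := by
  induction rs generalizing m with
  | nil => simp [jfst]
  | cons r rs ih =>
    simp only [jfst, List.length_cons]
    split
    · omega
    · exact Nat.succ_le_succ (ih _)

theorem jfst_cov (l : Nat) (rs : List String) : ∀ m, covb l (m ||| orAll l rs) = true →
    covb l (m ||| preO l rs (jfst l m rs)) = true := by
  induction rs with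
  | nil => intro m h; simpa [orAll, preO] using h
  | cons r rs ih =>
    intro m h
    by_cases hm : covb l m = true
    · simpa [jfst, hm, preO_zero, Nat.or_zero] using hm
    · simp only [jfst, hm, Bool.false_eq_true, ite_false]
      rw [preO_cons, ← Nat.or_assoc]
      apply ih
      rwa [orAll_cons, ← Nat.or_assoc] at h

theorem jfst_min (l : Nat) (rs : List String) : ∀ m j, j < jfst l m rs →
    covb l (m ||| preO l rs j) = false := by
  induction rs with
  | nil => intro m j h; simp [jfst] at h
  | cons r rs ih =>
    intro m j h
    by_cases hm : covb l m = true
    · simp [jfst_of_cov l m _ hm] at h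
    · simp only [jfst, hm, Bool.false_eq_true, ite_false] at h
      cases j with
      | zero => simpa [preO_zero, Nat.or_zero] using eq_false_of_ne_true hm
      | succ j =>
        rw [preO_cons, ← Nat.or_assoc]
        exact ih _ j (by omega)

-- if every one of the first j rows equals t1 then they add nothing to m
theorem preO_all_eq (l : Nat) (t1 : String) (m : Nat) (rs : List String) (j : Nat)
    (hsub : maskRow l t1.toList ||| m = m)
    (hall : ∀ r ∈ rs.take j, r = t1) : m ||| preO l rs j = m := by
  induction rs generalizing j with
  | nil => simp [preO]
  | cons r rs ih =>
    cases j with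
    | zero => simp [preO_zero]
    | succ j =>
      rw [preO_cons, ← Nat.or_assoc]
      have hr : r = t1 := hall r (by simp)
      have hmr : m ||| maskRow l r.toList = m := by
        rw [hr, Nat.or_comm, hsub]
      rw [hmr]
      exact ih j (fun r' hr' => hall r' (by simp [List.take_succ_cons]; right; exact hr'))

theorem eqcnt_lt_jfst (l : Nat) (t1 : String) (m : Nat) (rs : List String)
    (hsub : maskRow l t1.toList ||| m = m) (hnc : covb l m = false)
    (hc : covb l (m ||| preO l rs (jfst l m rs)) = true) :
    eqcnt t1 rs (jfst l m rs) < jfst l m rs := by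
  set j := jfst l m rs with hj
  have hjne : j ≠ 0 := by
    intro h0
    rw [h0, preO_zero, Nat.or_zero] at hc
    rw [hc] at hnc
    exact absurd hnc (by simp)
  have hjle : j ≤ rs.length := hj ▸ jfst_le l m rs
  have hlen : (rs.take j).length = j := by simp [List.length_take]; omega
  have hle : eqcnt t1 rs j ≤ j := by
    calc eqcnt t1 rs j ≤ (rs.take j).length := List.countP_le_length
    _ = j := hlen
  rcases Nat.lt_or_ge (eqcnt t1 rs j) j with h | h
  · exact h
  · exfalso
    have heq : eqcnt t1 rs j = (rs.take j).length := by omega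
    have hall : ∀ r ∈ rs.take j, r = t1 := by
      intro r hr
      exact beq_iff_eq.mp (List.countP_eq_length.mp heq r hr)
    have hPre := preO_all_eq l t1 m rs j hsub hall
    rw [hPre] at hc
    rw [hc] at hnc
    exact absurd hnc (by simp)

theorem Sspec_closed (l : Nat) (t1 : String) : ∀ (rs : List String) (m : Nat) (cnt : Int),
    maskRow l t1.toList ||| m = m →
    Sspec l t1 rs m cnt =
      if covb l (m ||| orAll l rs) then
        PySem.List.pyRange (cnt + (cstart l t1 m rs : Int)) (cnt + (necnt t1 rs : Int) + 1) 1
      else [] := by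
  intro rs
  induction rs with
  | nil =>
    intro m cnt _
    have hc : cstart l t1 m [] = 1 := by simp [cstart, jfst, eqcnt]
    have hn : necnt t1 [] = 0 := by simp [necnt]
    simp only [Sspec, hc, hn]
    split
    · rw [PySem.List.pyRange_one_eq_nil (by push_cast; omega)]
    · rfl
  | cons r rs ih =>
    intro m cnt hsub
    by_cases heq : (t1 == r) = true
    · -- equal row: skipped, mask unchanged
      have ht : t1 = r := beq_iff_eq.mp heq
      have hrt : (r == t1) = true := beq_iff_eq.mpr ht.symm
      have hmr : m ||| maskRow l r.toList = m := by
        rw [← ht, Nat.or_comm, hsub]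
      have hor : m ||| orAll l (r :: rs) = m ||| orAll l rs := by
        rw [orAll_cons, ← Nat.or_assoc, hmr]
      have hne : necnt t1 (r :: rs) = necnt t1 rs := by
        simp [necnt, List.countP_cons, heq]
      have hcs : cstart l t1 m (r :: rs) = cstart l t1 m rs := by
        by_cases hm : covb l m = true
        · simp [cstart, jfst_of_cov l m _ hm, eqcnt]
        · have hj : jfst l m (r :: rs) = jfst l m rs + 1 := by
            simp only [jfst]
            rw [if_neg hm, hmr]
          have he : eqcnt t1 (r :: rs) (jfst l m rs + 1) = eqcnt t1 rs (jfst l m rs) + 1 := by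
            simp [eqcnt, List.take_succ_cons, List.countP_cons, hrt]
          simp only [cstart, hj, he, Nat.succ_sub_succ]
      rw [show Sspec l t1 (r :: rs) m cnt = Sspec l t1 rs m cnt by simp [Sspec, heq]]
      rw [ih m cnt hsub, hor, hne, hcs]
    · -- distinct row
      have hrne : (r == t1) = false := by
        rw [beq_eq_false_iff_ne]
        intro h
        exact heq (beq_iff_eq.mpr h.symm)
      have hS : Sspec l t1 (r :: rs) m cnt =
          (if covb l (m ||| maskRow l r.toList) then [cnt + 1] else [])
          ++ Sspec l t1 rs (m ||| maskRow l r.toList) (cnt + 1) := by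
        simp [Sspec, heq]
      have hsub' : maskRow l t1.toList ||| (m ||| maskRow l r.toList) = m ||| maskRow l r.toList := by
        rw [← Nat.or_assoc, hsub]
      have hor : m ||| orAll l (r :: rs) = (m ||| maskRow l r.toList) ||| orAll l rs := by
        rw [orAll_cons, ← Nat.or_assoc]
      have hnecnt : necnt t1 (r :: rs) = necnt t1 rs + 1 := by
        have hb : (!(t1 == r)) = true := by simp [heq]
        simp [necnt, List.countP_cons, hb]
      rw [hS, ih (m ||| maskRow l r.toList) (cnt + 1) hsub', hor, hnecnt]
      by_cases hov : covb l ((m ||| maskRow l r.toList) ||| orAll l rs) = true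
      · rw [if_pos hov, if_pos hov]
        by_cases hm1 : covb l (m ||| maskRow l r.toList) = true
        · -- already covered after this row: counters start at cnt+1
          have hcs' : cstart l t1 (m ||| maskRow l r.toList) rs = 1 := by
            simp [cstart, jfst_of_cov l _ _ hm1, eqcnt]
          have hcs : cstart l t1 m (r :: rs) = 1 := by
            by_cases hm : covb l m = true
            · simp [cstart, jfst_of_cov l m _ hm, eqcnt]
            · have hj : jfst l m (r :: rs) = 1 := by
                simp only [jfst]
                rw [if_neg hm, jfst_of_cov l _ _ hm1]
              have he : eqcnt t1 (r :: rs) 1 = 0 := by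
                simp [eqcnt, List.countP_cons, hrne]
              simp [cstart, hj, he]
          rw [if_pos hm1, hcs, hcs']
          push_cast
          rw [show cnt + ((necnt t1 rs : Int) + 1) + 1 = cnt + 1 + (necnt t1 rs : Int) + 1 from by ring]
          rw [show PySem.List.pyRange (cnt + 1) (cnt + 1 + (necnt t1 rs : Int) + 1) 1
              = (cnt + 1) :: PySem.List.pyRange (cnt + 1 + 1) (cnt + 1 + (necnt t1 rs : Int) + 1) 1 from
            PySem.List.pyRange_one_cons (by omega)]
          rw [List.singleton_append]
        · -- not yet covered: shift start by one
          have hm : covb l m = false := by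
            cases h : covb l m with
            | false => rfl
            | true => exact absurd (covb_mono l m (maskRow l r.toList) h) hm1
          rw [if_neg hm1]
          have hj : jfst l m (r :: rs) = jfst l (m ||| maskRow l r.toList) rs + 1 := by
            simp only [jfst]
            rw [if_neg (by simp [hm])]
          have he : eqcnt t1 (r :: rs) (jfst l (m ||| maskRow l r.toList) rs + 1)
              = eqcnt t1 rs (jfst l (m ||| maskRow l r.toList) rs) := by
            simp [eqcnt, List.take_succ_cons, List.countP_cons, hrne]
          have hlt : eqcnt t1 rs (jfst l (m ||| maskRow l r.toList) rs)
              < jfst l (m ||| maskRow l r.toList) rs := by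
            apply eqcnt_lt_jfst l t1 (m ||| maskRow l r.toList) rs hsub'
              (by cases h : covb l (m ||| maskRow l r.toList) with
                  | false => rfl
                  | true => exact absurd h hm1)
            exact jfst_cov l rs (m ||| maskRow l r.toList) hov
          have hcs : cstart l t1 m (r :: rs) = cstart l t1 (m ||| maskRow l r.toList) rs + 1 := by
            simp only [cstart, hj, he]
            omega
          rw [hcs]
          rw [List.nil_append]
          congr 1 <;> push_cast <;> ring
      · rw [if_neg hov, if_neg hov]
        have hm1 : covb l (m ||| maskRow l r.toList) = false := by
          cases h : covb l (m ||| maskRow l r.toList) with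
          | false => rfl
          | true => exact absurd (covb_mono l _ (orAll l rs) h) hov
        rw [if_neg (by simp [hm1])]
        simp

-- ---- A side: 0/1 temp lists are bitmask images ----

def tempOf (l m : Nat) : List Int := (List.range l).map fun i => if m.testBit i then 1 else 0

theorem tempOf_length (l m : Nat) : (tempOf l m).length = l := by simp [tempOf]

theorem tempOf_getD (l m i : Nat) (hi : i < l) :
    (tempOf l m).getD i 0 = if m.testBit i then 1 else 0 := by
  simp [tempOf, List.getD_eq_getElem?_getD, hi]

theorem ext_getD {a b : List Int} (hlen : a.length = b.length)
    (h : ∀ i < a.length, a.getD i 0 = b.getD i 0) : a = b := by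
  apply List.ext_getElem hlen
  intro i h1 h2
  have hd := h i h1
  rw [List.getD_eq_getElem?_getD, List.getD_eq_getElem?_getD,
    List.getElem?_eq_getElem h1, List.getElem?_eq_getElem h2] at hd
  simpa using hd

theorem setfold_length (p : Nat → Prop) [DecidablePred p] (rng : List Nat) (temp : List Int) :
    (rng.foldl (fun t j => if p j then t.set j 1 else t) temp).length = temp.length := by
  induction rng generalizing temp with
  | nil => rfl
  | cons a rng ih =>
    simp only [List.foldl_cons]
    rw [ih]
    split <;> simp

theorem setfold_getD (p : Nat → Prop) [DecidablePred p] :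
    ∀ (rng : List Nat) (temp : List Int) (i : Nat), (∀ j ∈ rng, j < temp.length) →
    ((rng.foldl (fun t j => if p j then t.set j 1 else t) temp).getD i 0)
      = if i ∈ rng ∧ p i then 1 else temp.getD i 0 := by
  intro rng
  induction rng with
  | nil => intro temp i _; simp
  | cons a rng ih =>
    intro temp i hlen
    simp only [List.foldl_cons]
    rw [ih _ i (by intro j hj
                   have := hlen j (by simp [hj])
                   split <;> simp [this])]
    by_cases hmem : i ∈ rng ∧ p i
    · rw [if_pos hmem, if_pos ⟨by simp [hmem.1], hmem.2⟩]
    · rw [if_neg hmem]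
      by_cases hia : i = a
      · subst hia
        by_cases hp : p i
        · rw [if_pos hp, if_pos ⟨by simp, hp⟩]
          rw [List.getD_eq_getElem?_getD, List.getElem?_set]
          simp [hlen i (by simp)]
        · rw [if_neg hp, if_neg (by rintro ⟨-, h⟩; exact hp h)]
      · have hstep : (if p a then temp.set a 1 else temp).getD i 0 = temp.getD i 0 := by
          split
          · rw [List.getD_eq_getElem?_getD, List.getElem?_set, if_neg (fun h => hia h.symm),
              ← List.getD_eq_getElem?_getD]
          · rfl
        rw [hstep, if_neg (by rintro ⟨h, hp⟩
                              rcases List.mem_cons.mp h with h | h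
                              · exact hia h
                              · exact hmem ⟨h, hp⟩)]

theorem orfold_testBit (p : Nat → Prop) [DecidablePred p] :
    ∀ (rng : List Nat) (m0 i : Nat),
    ((rng.foldl (fun m j => if p j then m ||| (1 <<< j) else m) m0)).testBit i
      = (m0.testBit i || (decide (i ∈ rng) && decide (p i))) := by
  intro rng
  induction rng with
  | nil => intro m0 i; simp
  | cons a rng ih =>
    intro a0 i
    simp only [List.foldl_cons]
    rw [ih]
    by_cases hia : i = a
    · subst hia
      by_cases hp : p i
      · simp [hp, Nat.testBit_or, Nat.one_shiftLeft, Nat.testBit_two_pow]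
      · simp [hp]
    · by_cases hp : p a
      · simp [hp, Nat.testBit_or, Nat.one_shiftLeft, Nat.testBit_two_pow, Ne.symm hia, hia]
      · simp [hp, hia]

theorem maskRow_testBit (l : Nat) (r : List Char) (i : Nat) :
    (maskRow l r).testBit i = (decide (i < l) && decide (r.getD i ' ' = 'O')) := by
  rw [maskRow, orfold_testBit (fun j => r.getD j ' ' = 'O') (List.range l) 0 i]
  simp [List.mem_range]

theorem setfold_tempOf (l m : Nat) (r : List Char) :
    (List.range l).foldl (fun temp j => if r.getD j ' ' = 'O' then temp.set j 1 else temp) (tempOf l m)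
      = tempOf l (m ||| maskRow l r) := by
  have hlen : ((List.range l).foldl (fun temp j => if r.getD j ' ' = 'O' then temp.set j 1 else temp) (tempOf l m)).length = l := by
    rw [setfold_length (fun j => r.getD j ' ' = 'O'), tempOf_length]
  apply ext_getD (by rw [hlen, tempOf_length])
  intro i hi'
  rw [hlen] at hi'
  rw [setfold_getD (fun j => r.getD j ' ' = 'O') _ _ i
      (by intro j hj; rw [tempOf_length]; exact List.mem_range.mp hj),
    tempOf_getD l m i hi', tempOf_getD l (m ||| maskRow l r) i hi']
  simp only [Nat.testBit_or, maskRow_testBit, List.mem_range, hi', decide_true, Bool.true_and]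
  by_cases hO : r.getD i ' ' = 'O' <;> by_cases hb : m.testBit i <;> simp [hO, hb]

theorem tempOf_zero (l : Nat) : tempOf l 0 = List.replicate l (0 : Int) := by
  simp [tempOf, List.eq_replicate_iff]

theorem tempOf_beq_ones (l m : Nat) :
    (tempOf l m == List.replicate l (1 : Int)) = covb l m := by
  cases h : covb l m with
  | true =>
    have hrep : tempOf l m = List.replicate l (1 : Int) := by
      rw [List.eq_replicate_iff]
      refine ⟨tempOf_length l m, ?_⟩
      intro b hb
      rcases List.mem_map.mp hb with ⟨i, hi, hbi⟩
      rw [covb_iff] at h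
      rw [← hbi, if_pos (h i (List.mem_range.mp hi))]
    simp [hrep]
  | false =>
    rw [beq_eq_false_iff_ne]
    intro hcon
    have h' : ∀ i < l, m.testBit i = true := by
      intro i hi
      have h1 : (tempOf l m).getD i 0 = (List.replicate l (1 : Int)).getD i 0 := by rw [hcon]
      rw [tempOf_getD l m i hi] at h1
      rw [List.getD_eq_getElem?_getD, List.getElem?_replicate, if_pos hi] at h1
      cases hb : m.testBit i with
      | true => rfl
      | false =>
        rw [if_neg (by simp [hb])] at h1
        norm_num at h1
    rw [← covb_iff] at h'
    rw [h'] at h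
    cases h

-- A's inner loop produces exactly Sspec (plus some final mask and counter)
theorem A_loop (l : Nat) (t1 : String) :
    ∀ (rs : List String) (m : Nat) (cnt : Int) (ans : List Int),
    ∃ m2 c2, rs.foldl (fun (st : List Int × Int × List Int) t2 =>
        if t1 == t2 then st
        else ((List.range l).foldl
                (fun temp j => if t2.toList.getD j ' ' = 'O' then temp.set j 1 else temp) st.1,
              st.2.1 + 1,
              if (List.range l).foldl
                  (fun temp j => if t2.toList.getD j ' ' = 'O' then temp.set j 1 else temp) st.1
                  == List.replicate l (1 : Int)
              then st.2.2 ++ [st.2.1 + 1] else st.2.2))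
      (tempOf l m, cnt, ans)
      = (tempOf l m2, c2, ans ++ Sspec l t1 rs m cnt) := by
  intro rs
  induction rs with
  | nil => intro m cnt ans; exact ⟨m, cnt, by simp [Sspec]⟩
  | cons r rs ih =>
    intro m cnt ans
    by_cases heq : (t1 == r) = true
    · rw [List.foldl_cons, if_pos heq]
      rw [show Sspec l t1 (r :: rs) m cnt = Sspec l t1 rs m cnt from by simp [Sspec, heq]]
      exact ih m cnt ans
    · rw [List.foldl_cons, if_neg heq]
      dsimp only
      rw [setfold_tempOf l m r.toList, tempOf_beq_ones]
      rcases ih (m ||| maskRow l r.toList) (cnt + 1)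
          (if covb l (m ||| maskRow l r.toList) then ans ++ [cnt + 1] else ans) with ⟨m2, c2, hih⟩
      refine ⟨m2, c2, ?_⟩
      rw [hih]
      simp only [Sspec, heq, Bool.false_eq_true, if_false]
      split <;> simp

theorem foldl_fun_eq {α β : Type} (F G : α → β → α) (h : ∀ a x, F a x = G a x) :
    ∀ (xs : List β) (a : α), xs.foldl F a = xs.foldl G a := by
  intro xs
  induction xs with
  | nil => intro a; rfl
  | cons x xs ih => intro a; simp only [List.foldl_cons, h]; exact ih _

-- ---- B side ----

def bitsLt (l x : Nat) : Prop := ∀ i, x.testBit i = true → i < l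

theorem bitsLt_maskRow (l : Nat) (r : List Char) : bitsLt l (maskRow l r) := by
  intro i h
  rw [maskRow_testBit] at h
  simp only [Bool.and_eq_true, decide_eq_true_eq] at h
  exact h.1

theorem bitsLt_or (l x y : Nat) (hx : bitsLt l x) (hy : bitsLt l y) : bitsLt l (x ||| y) := by
  intro i h
  rw [Nat.testBit_or] at h
  rcases Bool.or_eq_true_iff.mp h with h | h
  · exact hx i h
  · exact hy i h

theorem bitsLt_preO (l : Nat) (rs : List String) (j : Nat) : bitsLt l (preO l rs j) := by
  rw [preO]
  generalize rs.take j = xs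
  suffices h : ∀ (xs : List String) (a : Nat), bitsLt l a →
      bitsLt l (xs.foldl (fun a r => a ||| maskRow l r.toList) a) by
    exact h xs 0 (by intro i hi; simp [Nat.zero_testBit] at hi)
  intro xs
  induction xs with
  | nil => intro a ha; exact ha
  | cons x xs ih =>
    intro a ha
    exact ih _ (bitsLt_or l a _ ha (bitsLt_maskRow l x.toList))

theorem bitsLt_orAll (l : Nat) (rs : List String) : bitsLt l (orAll l rs) :=
  bitsLt_preO l rs rs.length

theorem beq_full_eq_covb (l x : Nat) (hx : bitsLt l x) :
    (x == 2 ^ l - 1) = covb l x := by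
  by_cases h : x = 2 ^ l - 1
  · subst h
    have hc : covb l (2 ^ l - 1) = true := by
      rw [covb_iff]
      intro i hi
      simp [Nat.testBit_two_pow_sub_one, hi]
    rw [hc]
    simp
  · rw [beq_eq_false_iff_ne.mpr h]
    cases hc : covb l x with
    | false => rfl
    | true =>
      exfalso
      apply h
      apply Nat.eq_of_testBit_eq
      intro i
      rw [Nat.testBit_two_pow_sub_one]
      by_cases hi : i < l
      · rw [covb_iff] at hc
        simp [hc i hi, hi]
      · have hb : x.testBit i = false := by
          cases hb : x.testBit i with
          | false => rfl
          | true => exact absurd (hx i hb) hi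
        simp [hb, hi]

-- the prefix-OR list Source B builds ([0] left off)
def G : List Nat → Nat → List Nat
  | [], _ => []
  | m :: ms, a => (a ||| m) :: G ms (a ||| m)

theorem pr_fold : ∀ (ms ps : List Nat) (a : Nat),
    (ms.foldl (fun (st : List Nat × Nat) m => (st.1 ++ [st.2 ||| m], st.2 ||| m)) (ps, a)).1
      = ps ++ G ms a := by
  intro ms
  induction ms with
  | nil => intro ps a; simp [G]
  | cons m ms ih =>
    intro ps a
    simp only [List.foldl_cons]
    rw [ih]
    simp [G]

theorem G_len : ∀ (ms : List Nat) (a : Nat), (G ms a).length = ms.length := by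
  intro ms
  induction ms with
  | nil => intro a; rfl
  | cons m ms ih => intro a; simp [G, ih]

theorem G_getD : ∀ (ms : List Nat) (a j : Nat), j ≤ ms.length →
    ((a :: G ms a).getD j 0) = (ms.take j).foldl (· ||| ·) a := by
  intro ms
  induction ms with
  | nil =>
    intro a j hj
    have : j = 0 := Nat.le_zero.mp hj
    subst this
    simp
  | cons m ms ih =>
    intro a j hj
    cases j with
    | zero => simp
    | succ j =>
      show ((a ||| m) :: G ms (a ||| m)).getD j 0 = _
      rw [ih (a ||| m) j (by simpa using hj)]
      simp

theorem prGetD (l : Nat) (table : List String) (j : Nat) (hj : j ≤ table.length) :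
    ((0 : Nat) :: G (table.map fun r => maskRow l r.toList) 0).getD j 0 = preO l table j := by
  rw [G_getD _ _ j (by simpa)]
  rw [← List.map_take, List.foldl_map]
  rfl

theorem findIdx_pr (l : Nat) (table : List String) (m : Nat) (hm : bitsLt l m)
    (hov : covb l (m ||| orAll l table) = true) :
    ((0 : Nat) :: G (table.map fun r => maskRow l r.toList) 0).findIdx
        (fun p => (m ||| p) == 2 ^ l - 1) = jfst l m table := by
  have hlen : ((0 : Nat) :: G (table.map fun r => maskRow l r.toList) 0).length
      = table.length + 1 := by simp [G_len]
  have hjlt : jfst l m table < ((0 : Nat) :: G (table.map fun r => maskRow l r.toList) 0).length := by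
    rw [hlen]
    exact Nat.lt_succ_of_le (jfst_le l m table)
  apply (List.findIdx_eq hjlt).mpr
  constructor
  · rw [← List.getD_eq_getElem _ 0 hjlt, prGetD l table _ (jfst_le l m table)]
    rw [beq_full_eq_covb l _ (bitsLt_or l m _ hm (bitsLt_preO l table _))]
    exact jfst_cov l table m hov
  · intro j hj
    have hjl : j < ((0 : Nat) :: G (table.map fun r => maskRow l r.toList) 0).length := by omega
    rw [← List.getD_eq_getElem _ 0 hjl,
      prGetD l table j (by have := jfst_le l m table; omega)]
    rw [beq_full_eq_covb l _ (bitsLt_or l m _ hm (bitsLt_preO l table _))]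
    exact jfst_min l table m j hj

theorem zip_self_map {α β : Type} (xs : List α) (f : α → β) :
    xs.zip (xs.map f) = xs.map (fun x => (x, f x)) := by
  induction xs with
  | nil => rfl
  | cons x xs ih => simp [ih]

theorem count_compl (t1 : String) (table : List String) :
    table.countP (fun r => r == t1) + necnt t1 table = table.length := by
  rw [necnt, List.length_eq_countP_add_countP (fun r => r == t1)]
  congr 1
  apply List.countP_congr
  intro r _
  by_cases h : t1 = r
  · subst h; simp
  · have h1 : (t1 == r) = false := beq_eq_false_iff_ne.mpr h
    have h2 : (r == t1) = false := beq_eq_false_iff_ne.mpr (fun he => h he.symm)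
    simp [h1, h2]

-- A as a fold of Sspec
theorem A_eq (table : List String) :
    solution table = table.foldl (fun ans t1 =>
      ans ++ Sspec ((table.headD "").toList.length) t1 table
        (maskRow ((table.headD "").toList.length) t1.toList) 0) [] := by
  simp only [solution]
  generalize (table.headD "").toList.length = l
  apply foldl_fun_eq
  intro ans t1
  rw [← tempOf_zero l, setfold_tempOf l 0 t1.toList, Nat.zero_or]
  obtain ⟨m2, c2, hA⟩ := A_loop l t1 table (maskRow l t1.toList) 0 ans
  rw [hA]

-- B as the same fold of Sspec
theorem B_eq (table : List String) :
    solution_alt table = table.foldl (fun ans t1 =>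
      ans ++ Sspec ((table.headD "").toList.length) t1 table
        (maskRow ((table.headD "").toList.length) t1.toList) 0) [] := by
  simp only [solution_alt, Nat.one_shiftLeft]
  generalize (table.headD "").toList.length = l
  rw [zip_self_map table (fun row => maskRow l row.toList), List.foldl_map]
  rw [pr_fold (table.map fun row => maskRow l row.toList) [0] 0, List.singleton_append]
  apply foldl_fun_eq
  intro ans t1
  rw [prGetD l table table.length (le_refl _), ← orAll_def]
  have hbits := bitsLt_or l (maskRow l t1.toList) (orAll l table)
    (bitsLt_maskRow l t1.toList) (bitsLt_orAll l table)
  have hbeq := beq_full_eq_covb l (maskRow l t1.toList ||| orAll l table) hbits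
  rw [Sspec_closed l t1 table (maskRow l t1.toList) 0 (Nat.or_self _)]
  cases hcov : covb l (maskRow l t1.toList ||| orAll l table) with
  | false => simp [bne, hbeq, hcov]
  | true =>
    simp only [bne, hbeq, hcov, Bool.not_true, Bool.false_eq_true, if_false, if_pos]
    rw [findIdx_pr l table (maskRow l t1.toList) (bitsLt_maskRow l t1.toList) hcov]
    congr 1
    have hcnt := count_compl t1 table
    congr 1
    · have hstart : (if jfst l (maskRow l t1.toList) table
            - (table.take (jfst l (maskRow l t1.toList) table)).countP (fun r => r == t1) < 1
          then 1
          else jfst l (maskRow l t1.toList) table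
            - (table.take (jfst l (maskRow l t1.toList) table)).countP (fun r => r == t1))
          = cstart l t1 (maskRow l t1.toList) table := by
        simp only [cstart, eqcnt]
        split <;> omega
      rw [hstart]
      push_cast
      ring
    · have hne : (necnt t1 table : Int) = (table.length : Int) - (table.countP (fun r => r == t1) : Int) := by
        omega
      rw [hne]
      push_cast
      ring

theorem main_eq (table : List String) : solution table = solution_alt table := by
  rw [A_eq, B_eq]

-- ===== VERDICT (by name: the statement is the Claim_ definition above) =====
theorem solution_spec : Claim_equal_solution := by
  unfold Claim_equal_solution
  intro table _ _
  unfold Spec_solution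
  exact main_eq table
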